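-- pv_equiv track=rewrite | github.com/joyhee0046/TIL | 5차 시험/temp.py | cal_wall
-- ===== SOURCE A (Python) =====
-- from collections import deque
-- from collections import deque
-- from collections import deque
-- from collections import deque
-- from copy import deepcopy
--
-- dy = [-1, 0, 1, 0]
--
-- dx = [0, 1, 0, -1]
--
-- def cal_wall(board, start_y, start_x):
--     c_board = deepcopy(board)
--     next_board = [[0] * len(board[0]) for _ in range(len(board))]
--     # 큐 도는 동안 c_board 배열 손상시키기
--     queue = deque([])
--     queue.append((start_y, start_x, c_board[start_y][start_x]))
--     c_board[start_y][start_x] = 0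
--     while queue:
--         y, x, cnt = queue.popleft()
--         # 2면 +1만 터져야하고, 3이어야 +1, +2가 터지기 때문
--         for pos in range(1, cnt):
--             for i in range(4):
--                 ny = y + dy[i] * pos
--                 nx = x + dx[i] * pos
--                 if ny < 0 or nx < 0 or ny >= len(board) or nx >= len(board[0]):
--                     continue
--                 if c_board[ny][nx] == 0:
--                     continue
--                 queue.append((ny, nx, c_board[ny][nx]))
--                 c_board[ny][nx] = 0
--     for idx_x in range(len(board[0])):
--         cur_y = len(board) - 1
--         for idx_y in range(len(board)):
--             if c_board[len(board) - idx_y - 1][idx_x] != 0: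
--                 next_board[cur_y][idx_x] = c_board[len(board) - idx_y - 1][idx_x]
--                 cur_y -= 1
--     return next_board
-- ===== SOURCE B (Python) =====
-- # B: recursive chain explosion (DFS on a copied grid) instead of A's deque BFS, and a
-- # purely functional per-column gravity rebuild (filter survivors, pad zeros, assemble
-- # rows) instead of A's index-mutating write into a preallocated grid.
-- def cal_wall(board, start_y, start_x):
--     h, w = len(board), len(board[0])
--     c = [row[:] for row in board]
--
--     def explode(y, x, cnt):
--         for pos in range(1, cnt):
--             for dy_, dx_ in ((-1, 0), (0, 1), (1, 0), (0, -1)):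
--                 ny, nx = y + dy_ * pos, x + dx_ * pos
--                 if 0 <= ny < h and 0 <= nx < w and c[ny][nx] != 0:
--                     v = c[ny][nx]
--                     c[ny][nx] = 0
--                     explode(ny, nx, v)
--
--     v0 = c[start_y][start_x]
--     c[start_y][start_x] = 0
--     explode(start_y, start_x, v0)
--
--     cols = []
--     for cc in range(w):
--         vals = [c[r][cc] for r in range(h) if c[r][cc] != 0]
--         cols.append([0] * (h - len(vals)) + vals)
--     return [[cols[cc][r] for cc in range(w)] for r in range(h)]
-- ===== Notes on version B (the rewrite author's own statement) =====
-- stated objective: alternative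
-- what changed: B replaces A's deque-based BFS (pop-left, push-right chain explosion over an explicit queue) with a recursive depth-first explode helper that zeroes a neighbour and immediately recurses into it, and replaces A's in-place index-mutating gravity pass (cur_y counter writing into a preallocated grid) with a purely functional per-column rebuild (filter survivors, pad zeros on top, assemble rows).
import Mathlib
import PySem

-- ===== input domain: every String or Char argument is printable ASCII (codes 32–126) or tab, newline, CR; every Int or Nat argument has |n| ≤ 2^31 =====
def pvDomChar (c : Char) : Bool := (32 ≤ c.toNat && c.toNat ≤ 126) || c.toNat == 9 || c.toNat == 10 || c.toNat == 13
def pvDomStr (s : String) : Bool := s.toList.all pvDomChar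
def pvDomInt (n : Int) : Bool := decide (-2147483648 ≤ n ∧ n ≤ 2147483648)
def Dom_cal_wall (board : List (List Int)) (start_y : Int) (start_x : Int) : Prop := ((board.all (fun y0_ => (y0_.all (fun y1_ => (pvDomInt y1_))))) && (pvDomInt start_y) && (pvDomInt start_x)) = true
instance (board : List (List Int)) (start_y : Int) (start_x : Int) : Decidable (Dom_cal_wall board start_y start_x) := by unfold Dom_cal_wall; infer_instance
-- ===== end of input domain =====

-- B replaces A's deque BFS with a recursive depth-first explode helper and A's
-- index-mutating gravity with a per-column rebuild; same return value (neither mutates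
-- the argument).

-- shared cell primitives: b[y][x] reads / writes, exact where Python indexing is in
-- range (Pre_ guarantees that at every use; both bound-checks guard every other use)
def pvRead (b : List (List Int)) (y x : Int) : Int :=
  PySem.List.pyGetD (PySem.List.pyGetD b y []) x 0

def pvWrite (b : List (List Int)) (y x v : Int) : List (List Int) :=
  PySem.List.pySetD b y (PySem.List.pySetD (PySem.List.pyGetD b y []) x v)

-- ===== PORT A =====
def pvDy : List Int := [-1, 0, 1, 0]
def pvDx : List Int := [0, 1, 0, -1]

-- one (pos, i) iteration of A's inner double loop; state = (c_board, items appended to the queue)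
def pvStepA (h w : Nat) (y x : Int) (st : List (List Int) × List (Int × Int × Int))
    (p : Int × Int) : List (List Int) × List (Int × Int × Int) :=
  let ny := y + PySem.List.pyGetD pvDy p.2 0 * p.1
  let nx := x + PySem.List.pyGetD pvDx p.2 0 * p.1
  if ny < 0 ∨ nx < 0 ∨ ny ≥ (h : Int) ∨ nx ≥ (w : Int) then st
  else if pvRead st.1 ny nx = 0 then st
  else (pvWrite st.1 ny nx 0, st.2 ++ [(ny, nx, pvRead st.1 ny nx)])

def pvScanA (h w : Nat) (b : List (List Int)) (y x cnt : Int) :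
    List (List Int) × List (Int × Int × Int) :=
  (PySem.List.pyRange 1 cnt 1).foldl
    (fun st pos => (PySem.List.pyRange 0 4 1).foldl (fun st i => pvStepA h w y x st (pos, i)) st)
    (b, [])

-- the while-loop over the deque; fuel ≥ |queue| + #nonzero cells never runs out
def pvBfsA (h w : Nat) : Nat → List (List Int) → List (Int × Int × Int) → List (List Int)
  | 0, b, _ => b
  | _ + 1, b, [] => b
  | fuel + 1, b, (y, x, cnt) :: q =>
    let r := pvScanA h w b y x cnt
    pvBfsA h w fuel r.1 (q ++ r.2)

-- A's gravity: scan each column bottom-up, writing survivors at cur_y, decrementing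
def pvGravityA (c : List (List Int)) (h w : Nat) : List (List Int) :=
  (List.range w).foldl
    (fun nb (idxX : Nat) =>
      ((List.range h).foldl
        (fun st (idxY : Nat) =>
          let v := pvRead c ((h : Int) - (idxY : Int) - 1) (idxX : Int)
          if v ≠ 0 then (pvWrite st.1 st.2 (idxX : Int) v, st.2 - 1) else st)
        (nb, (h : Int) - 1)).1)
    (List.replicate h (List.replicate w 0))

def cal_wall (board : List (List Int)) (start_y : Int) (start_x : Int) : List (List Int) :=
  let h := board.length
  let w := (PySem.List.pyGetD board 0 []).length
  let v0 := pvRead board start_y start_x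
  let c1 := pvWrite board start_y start_x 0
  let cf := pvBfsA h w (h * w + 1) c1 [(start_y, start_x, v0)]
  pvGravityA cf h w

-- ===== PORT B =====
def pvDirs : List (Int × Int) := [(-1, 0), (0, 1), (1, 0), (0, -1)]

-- B's recursive chain explosion: zero a nonzero neighbour, recurse into it at once;
-- the fuel only makes the recursion total (one nonzero cell is zeroed per call, so
-- #nonzero cells + 1 never runs out)
def pvExplode (h w : Nat) : Nat → List (List Int) → Int → Int → Int → List (List Int)
  | 0, b, _, _, _ => b
  | fuel + 1, b, y, x, cnt =>
    (PySem.List.pyRange 1 cnt 1).foldl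
      (fun b pos =>
        pvDirs.foldl
          (fun b d =>
            let ny := y + d.1 * pos
            let nx := x + d.2 * pos
            if 0 ≤ ny ∧ ny < (h : Int) ∧ 0 ≤ nx ∧ nx < (w : Int) ∧ pvRead b ny nx ≠ 0 then
              pvExplode h w fuel (pvWrite b ny nx 0) ny nx (pvRead b ny nx)
            else b)
          b)
      b

-- B's gravity: one settled column per c, zeros padded above the surviving values
def pvColsB (c : List (List Int)) (h w : Nat) : List (List Int) :=
  (List.range w).map (fun (cc : Nat) =>
    let vals := ((List.range h).map (fun (r : Nat) => pvRead c (r : Int) (cc : Int))).filter (fun v => v != 0)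
    List.replicate (h - vals.length) 0 ++ vals)

def cal_wall_alt (board : List (List Int)) (start_y : Int) (start_x : Int) : List (List Int) :=
  let h := board.length
  let w := (PySem.List.pyGetD board 0 []).length
  let v0 := pvRead board start_y start_x
  let c1 := pvWrite board start_y start_x 0
  let cf := pvExplode h w (h * w + 1) c1 start_y start_x v0
  let cols := pvColsB cf h w
  (List.range h).map (fun (r : Nat) => (List.range w).map (fun (cc : Nat) => pvRead cols (cc : Int) (r : Int)))

-- ===== PRECONDITION & SPEC =====
-- Pre_ is exactly where the Python A returns: a nonempty board whose rows are at least
-- as long as row 0 (a shorter row is an IndexError in A's gravity pass) and a start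
-- index Python list indexing accepts for the row and the cell (else IndexError).
def Pre_cal_wall (board : List (List Int)) (start_y : Int) (start_x : Int) : Prop :=
  board ≠ [] ∧
  (∀ row ∈ board, (PySem.List.pyGetD board 0 []).length ≤ row.length) ∧
  PySem.Raise.InRange board.length start_y ∧
  PySem.Raise.InRange (PySem.List.pyGetD board start_y []).length start_x
instance (board : List (List Int)) (start_y : Int) (start_x : Int) : Decidable (Pre_cal_wall board start_y start_x) := by unfold Pre_cal_wall; infer_instance

def pvWitness_cal_wall : List (List Int) × Int × Int := ([[2, 1], [0, 3]], 0, 0)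

def Spec_cal_wall (board : List (List Int)) (start_y : Int) (start_x : Int) (out : List (List Int)) : Prop := out = cal_wall_alt board start_y start_x
instance (board : List (List Int)) (start_y : Int) (start_x : Int) (out : List (List Int)) : Decidable (Spec_cal_wall board start_y start_x out) := by unfold Spec_cal_wall; infer_instance

-- ===== CLAIM (what is proved, stated in full; the proofs are below) =====
def Claim_equal_cal_wall : Prop := ∀ (board : List (List Int)) (start_y : Int) (start_x : Int), Dom_cal_wall board start_y start_x → Pre_cal_wall board start_y start_x → Spec_cal_wall board start_y start_x (cal_wall board start_y start_x)

-- ===== LEMMAS AND PROOFS =====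

-- ---- basic facts about the cell primitives ----

def pvShape (b : List (List Int)) : List Nat := b.map List.length

theorem pvIdx_of_inRange {n : Nat} {i : Int} (h : PySem.Raise.InRange n i) :
    ∃ k : Nat, PySem.List.pyIdx? n i = some k ∧ k < n := by
  obtain ⟨h1, h2⟩ := h
  unfold PySem.List.pyIdx?
  by_cases h3 : 0 ≤ i
  · rw [if_pos h3, if_pos (by omega)]; exact ⟨_, rfl, by omega⟩
  · rw [if_neg h3, if_pos (by omega)]; exact ⟨_, rfl, by omega⟩

theorem pvIdx_lt {n : Nat} {i : Int} {k : Nat} (h : PySem.List.pyIdx? n i = some k) : k < n := by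
  unfold PySem.List.pyIdx? at h
  split_ifs at h <;> simp_all <;> omega

theorem pvIdx_natCast {n : Nat} (k : Nat) (hk : k < n) : PySem.List.pyIdx? n (k : Int) = some k := by
  unfold PySem.List.pyIdx?
  rw [if_pos (by omega), if_pos (by exact_mod_cast hk)]
  simp

theorem pvGetD_setD_cases {α : Type} (xs : List α) (i j : Int) (v d : α) :
    PySem.List.pyGetD (PySem.List.pySetD xs i v) j d = PySem.List.pyGetD xs j d ∨
      (PySem.List.pyGetD (PySem.List.pySetD xs i v) j d = v ∧
        PySem.List.pyGetD xs j d = PySem.List.pyGetD xs i d) := by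
  unfold PySem.List.pySetD PySem.List.pySet? PySem.List.pyGetD PySem.List.pyGet?
  cases hk : PySem.List.pyIdx? xs.length i with
  | none => left; simp
  | some k =>
    have hkn : k < xs.length := pvIdx_lt hk
    simp only [Option.map_some, Option.getD_some, List.length_set]
    cases hm : PySem.List.pyIdx? xs.length j with
    | none => left; rfl
    | some m =>
      have hmn : m < xs.length := pvIdx_lt hm
      by_cases hmk : m = k
      · subst hmk
        right
        constructor
        · simp [List.getElem?_set_self (by omega : m < xs.length)]
        · rfl
      · left
        simp [List.getElem?_set_ne (by omega : k ≠ m)]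

theorem pvRead_natCast (b : List (List Int)) (r c : Nat) :
    pvRead b (r : Int) (c : Int) = (b.getD r []).getD c 0 := by
  simp [pvRead, PySem.List.pyGetD_natCast]

theorem pvShape_pvWrite (b : List (List Int)) (y x v : Int) :
    pvShape (pvWrite b y x v) = pvShape b := by
  unfold pvWrite PySem.List.pySetD PySem.List.pySet?
  cases hk : PySem.List.pyIdx? b.length y with
  | none => simp
  | some k =>
    have hkn : k < b.length := pvIdx_lt hk
    simp only [Option.map_some, Option.getD_some]
    have hrow : PySem.List.pyGetD b y [] = b[k] := by
      simp [PySem.List.pyGetD, PySem.List.pyGet?, hk, List.getElem?_eq_getElem hkn]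
    apply List.ext_getElem
    · simp [pvShape]
    · intro i h1 h2
      simp only [pvShape, List.getElem_map, List.getElem_set]
      split
      · next h =>
          subst h
          rw [hrow]
          cases PySem.List.pyIdx? (b[k]).length x <;> simp
      · rfl

theorem pvShape_length {b b' : List (List Int)} (h : pvShape b = pvShape b') :
    b.length = b'.length := by
  have := congrArg List.length h
  simpa [pvShape] using this

theorem pvShape_rowlen {b b' : List (List Int)} (h : pvShape b = pvShape b') (r : Nat) :
    (b.getD r []).length = (b'.getD r []).length := by
  by_cases hr : r < b.length
  · have hr' : r < b'.length := by rw [← pvShape_length h]; exact hr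
    have := congrArg (fun l => l.getD r 0) h
    simpa [pvShape, List.getD_eq_getElem?_getD, List.getElem?_eq_getElem hr,
      List.getElem?_eq_getElem hr', List.getElem?_map] using this
  · have hr' : ¬ r < b'.length := by rw [← pvShape_length h]; exact hr
    have e1 : b.getD r [] = ([] : List Int) := by
      rw [List.getD_eq_getElem?_getD, List.getElem?_eq_none_iff.mpr (by omega)]; rfl
    have e2 : b'.getD r [] = ([] : List Int) := by
      rw [List.getD_eq_getElem?_getD, List.getElem?_eq_none_iff.mpr (by omega)]; rfl
    rw [e1, e2]

theorem pvWrite_natCast (b : List (List Int)) (r0 c0 : Nat) (v : Int)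
    (hr0 : r0 < b.length) (hc0 : c0 < (b.getD r0 []).length) :
    pvWrite b (r0 : Int) (c0 : Int) v = b.set r0 ((b.getD r0 []).set c0 v) := by
  have h1 : PySem.List.pyIdx? b.length (r0 : Int) = some r0 := pvIdx_natCast r0 hr0
  have hrow : PySem.List.pyGetD b (r0 : Int) [] = b.getD r0 [] := by
    simp [PySem.List.pyGetD_natCast]
  have h2 : PySem.List.pyIdx? (b.getD r0 []).length (c0 : Int) = some c0 := pvIdx_natCast c0 hc0
  unfold pvWrite PySem.List.pySetD PySem.List.pySet?
  rw [hrow, h1, h2]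
  simp

theorem pvRead_pvWrite_nat (b : List (List Int)) (r0 c0 : Nat) (v : Int)
    (hr0 : r0 < b.length) (hc0 : c0 < (b.getD r0 []).length) (r c : Nat) :
    pvRead (pvWrite b (r0 : Int) (c0 : Int) v) (r : Int) (c : Int)
      = if r = r0 ∧ c = c0 then v else pvRead b (r : Int) (c : Int) := by
  rw [pvWrite_natCast b r0 c0 v hr0 hc0, pvRead_natCast, pvRead_natCast]
  by_cases hr : r = r0
  · subst hr
    have hrow : (b.set r ((b.getD r []).set c0 v)).getD r [] = (b.getD r []).set c0 v := by
      rw [List.getD_eq_getElem?_getD, List.getElem?_set_self (by simpa using hr0)]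
      simp
    rw [hrow]
    by_cases hc : c = c0
    · subst hc
      rw [List.getD_eq_getElem?_getD, List.getElem?_set_self (by simpa using hc0)]
      simp
    · rw [List.getD_eq_getElem?_getD, List.getElem?_set_ne (by omega : c0 ≠ c),
        ← List.getD_eq_getElem?_getD]
      simp [hc]
  · have hrow : (b.set r0 ((b.getD r0 []).set c0 v)).getD r [] = b.getD r [] := by
      rw [List.getD_eq_getElem?_getD, List.getElem?_set_ne (by omega : r0 ≠ r),
        ← List.getD_eq_getElem?_getD]
    rw [hrow]
    simp [hr]

-- any write of 0 can only turn entries to 0: an arbitrary read is unchanged or 0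
theorem pvRead_pvWrite0_cases (b : List (List Int)) (y0 x0 y x : Int) :
    pvRead (pvWrite b y0 x0 0) y x = pvRead b y x ∨ pvRead (pvWrite b y0 x0 0) y x = 0 := by
  unfold pvRead pvWrite
  rcases pvGetD_setD_cases b y0 y (PySem.List.pySetD (PySem.List.pyGetD b y0 []) x0 0) []
    with h | ⟨h1, h2⟩
  · left; rw [h]
  · rw [h1, h2]
    rcases pvGetD_setD_cases (PySem.List.pyGetD b y0 []) x0 x 0 0 with h | ⟨h3, _⟩
    · left; rw [h]
    · right; rw [h3]

theorem pvRead_zero_persist (b : List (List Int)) (y0 x0 y x : Int)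
    (h : pvRead b y x = 0) : pvRead (pvWrite b y0 x0 0) y x = 0 := by
  rcases pvRead_pvWrite0_cases b y0 x0 y x with h' | h' <;> simp [h', h]

-- ---- the exploded-cell closure both traversals compute ----

-- items reachable from the start by chain explosions, with their blast radii;
-- edge guards are those of both traversals, values read from the start-zeroed board b1
inductive pvReach (h w : Nat) (b1 : List (List Int)) (sy sx v0 : Int) : Int → Int → Int → Prop
  | base : pvReach h w b1 sy sx v0 sy sx v0
  | step {y x v pos dyv dxv : Int} (hR : pvReach h w b1 sy sx v0 y x v)
      (h1 : 1 ≤ pos) (h2 : pos < v) (hd : (dyv, dxv) ∈ pvDirs)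
      (hy0 : 0 ≤ y + dyv * pos) (hyh : y + dyv * pos < (h : Int))
      (hx0 : 0 ≤ x + dxv * pos) (hxw : x + dxv * pos < (w : Int))
      (hnz : pvRead b1 (y + dyv * pos) (x + dxv * pos) ≠ 0) :
      pvReach h w b1 sy sx v0 (y + dyv * pos) (x + dxv * pos)
        (pvRead b1 (y + dyv * pos) (x + dxv * pos))

theorem pvReach_val {h w : Nat} {b1 : List (List Int)} {sy sx v0 y x v : Int}
    (hR : pvReach h w b1 sy sx v0 y x v) :
    (y = sy ∧ x = sx ∧ v = v0) ∨
      (∃ rn cn : Nat, y = (rn : Int) ∧ x = (cn : Int) ∧ rn < h ∧ cn < w ∧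
        v = pvRead b1 y x ∧ v ≠ 0) := by
  cases hR with
  | base => exact Or.inl ⟨rfl, rfl, rfl⟩
  | step hR h1 h2 hd hy0 hyh hx0 hxw hnz =>
    right
    refine ⟨_, _, (Int.toNat_of_nonneg hy0).symm, (Int.toNat_of_nonneg hx0).symm, ?_, ?_, rfl, hnz⟩
    · omega
    · omega

-- A's direction tables agree with B's direction-pair list
theorem pvDir_of_idx {i : Int} (h0 : 0 ≤ i) (h4 : i < 4) :
    (PySem.List.pyGetD pvDy i 0, PySem.List.pyGetD pvDx i 0) ∈ pvDirs := by
  interval_cases i <;> decide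

theorem pvIdx_of_dir {dyv dxv : Int} (hd : (dyv, dxv) ∈ pvDirs) :
    ∃ i : Int, 0 ≤ i ∧ i < 4 ∧
      PySem.List.pyGetD pvDy i 0 = dyv ∧ PySem.List.pyGetD pvDx i 0 = dxv := by
  fin_cases hd
  · exact ⟨0, by omega, by omega, by decide, by decide⟩
  · exact ⟨1, by omega, by omega, by decide, by decide⟩
  · exact ⟨2, by omega, by omega, by decide, by decide⟩
  · exact ⟨3, by omega, by omega, by decide, by decide⟩

-- ---- the measure: number of nonzero in-grid cells ----

def pvCells (h w : Nat) : List (Nat × Nat) :=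
  (List.range h) ×ˢ (List.range w)

def pvNz (h w : Nat) (b : List (List Int)) : Nat :=
  (pvCells h w).countP (fun rc => pvRead b (rc.1 : Int) (rc.2 : Int) != 0)

theorem pvNz_le (h w : Nat) (b : List (List Int)) : pvNz h w b ≤ h * w := by
  calc (pvCells h w).countP _ ≤ (pvCells h w).length := List.countP_le_length
  _ = h * w := by simp [pvCells, List.length_product]

theorem pvCountP_flip {α : Type} (l : List α) (hl : l.Nodup) (a : α) (ha : a ∈ l)
    (p q : α → Bool) (hpa : p a = true) (hqa : q a = false)
    (hrest : ∀ x ∈ l, x ≠ a → q x = p x) : l.countP q + 1 = l.countP p := by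
  induction l with
  | nil => cases ha
  | cons x t ih =>
    rcases List.mem_cons.mp ha with rfl | hat
    · have ht : t.countP q = t.countP p := by
        apply List.countP_congr
        intro y hy
        have hq : q y = p y :=
          hrest y (List.mem_cons_of_mem _ hy) (fun hya => (List.nodup_cons.mp hl).1 (hya ▸ hy))
        rw [hq]
      rw [List.countP_cons, List.countP_cons, hpa, hqa, ht]
      simp
    · have hxa : x ≠ a := fun hxa => (List.nodup_cons.mp hl).1 (hxa ▸ hat)
      have hx : q x = p x := hrest x (List.mem_cons_self) hxa
      rw [List.countP_cons, List.countP_cons, hx]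
      have := ih (List.nodup_cons.mp hl).2 hat (fun y hy hya => hrest y (List.mem_cons_of_mem _ hy) hya)
      omega

theorem pvNz_write0 {h w : Nat} {b : List (List Int)} {r0 c0 : Nat}
    (hr0 : r0 < h) (hc0 : c0 < w) (hnz : pvRead b (r0 : Int) (c0 : Int) ≠ 0)
    (hlen : r0 < b.length) (hrow : c0 < (b.getD r0 []).length) :
    pvNz h w (pvWrite b (r0 : Int) (c0 : Int) 0) + 1 = pvNz h w b := by
  apply pvCountP_flip (pvCells h w) ?_ (r0, c0) ?_
  · simp [hnz]
  · rw [pvRead_pvWrite_nat b r0 c0 0 hlen hrow]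
    simp
  · intro x hx hxne
    have : ¬(x.1 = r0 ∧ x.2 = c0) := by
      intro ⟨e1, e2⟩; exact hxne (Prod.ext e1 e2)
    rw [pvRead_pvWrite_nat b r0 c0 0 hlen hrow, if_neg this]
  · exact (List.nodup_range).product (List.nodup_range)
  · simp [pvCells, hr0, hc0]

-- ---- the grid frame: fixed shape, rows at least w long ----

def pvGrid (b1 : List (List Int)) (h w : Nat) : Prop :=
  b1.length = h ∧ ∀ r : Nat, r < h → w ≤ (b1.getD r []).length

theorem pvGrid_of_shape {b1 b : List (List Int)} {h w : Nat}
    (hg : pvGrid b1 h w) (hs : pvShape b = pvShape b1) : pvGrid b h w :=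
  ⟨by rw [pvShape_length hs, hg.1], fun r hr => by rw [pvShape_rowlen hs r]; exact hg.2 r hr⟩

-- in-grid writes are in Python's index range
theorem pvGrid_write_ok {b : List (List Int)} {h w : Nat} (hg : pvGrid b h w)
    {r0 c0 : Nat} (hr0 : r0 < h) (hc0 : c0 < w) :
    r0 < b.length ∧ c0 < (b.getD r0 []).length :=
  ⟨by rw [hg.1]; exact hr0, lt_of_lt_of_le hc0 (hg.2 r0 hr0)⟩

-- ---- normalizing the start cell (Python's negative indexing) ----

theorem pvGetD_of_idx {α : Type} (xs : List α) (i : Int) (d : α) (k : Nat)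
    (hk : PySem.List.pyIdx? xs.length i = some k) : PySem.List.pyGetD xs i d = xs.getD k d := by
  unfold PySem.List.pyGetD PySem.List.pyGet?
  rw [hk]
  have := pvIdx_lt hk
  simp [List.getElem?_eq_getElem this, List.getD_eq_getElem?_getD]

theorem pvStart_norm (b0 : List (List Int)) (sy sx : Int)
    (hy : PySem.Raise.InRange b0.length sy)
    (hx : PySem.Raise.InRange (PySem.List.pyGetD b0 sy []).length sx) :
    ∃ ys xs0 : Nat, ys < b0.length ∧ xs0 < (b0.getD ys []).length ∧
      ∀ b : List (List Int), pvShape b = pvShape b0 →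
        (∀ v : Int, pvWrite b sy sx v = pvWrite b (ys : Int) (xs0 : Int) v) ∧
        pvRead b sy sx = pvRead b (ys : Int) (xs0 : Int) := by
  obtain ⟨ys, hys, hysn⟩ := pvIdx_of_inRange hy
  have hrow0 : PySem.List.pyGetD b0 sy [] = b0.getD ys [] := pvGetD_of_idx _ _ _ _ hys
  rw [hrow0] at hx
  obtain ⟨xs0, hxs, hxsn⟩ := pvIdx_of_inRange hx
  refine ⟨ys, xs0, hysn, hxsn, ?_⟩
  intro b hs
  have hlen : b.length = b0.length := pvShape_length hs
  have hys' : PySem.List.pyIdx? b.length sy = some ys := by rw [hlen]; exact hys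
  have hrowb : PySem.List.pyGetD b sy [] = b.getD ys [] := pvGetD_of_idx _ _ _ _ hys'
  have hrlen : (b.getD ys []).length = (b0.getD ys []).length := pvShape_rowlen hs ys
  have hxs' : PySem.List.pyIdx? (b.getD ys []).length sx = some xs0 := by rw [hrlen]; exact hxs
  have hysN : PySem.List.pyIdx? b.length ((ys : Nat) : Int) = some ys := pvIdx_natCast ys (by omega)
  have hxsN : PySem.List.pyIdx? (b.getD ys []).length ((xs0 : Nat) : Int) = some xs0 :=
    pvIdx_natCast xs0 (by omega)
  constructor
  · intro v
    unfold pvWrite PySem.List.pySetD PySem.List.pySet?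
    rw [hrowb, hys', hxs']
    have hrowbN : PySem.List.pyGetD b ((ys : Nat) : Int) [] = b.getD ys [] := by
      simp [PySem.List.pyGetD_natCast]
    rw [hrowbN, hysN, hxsN]
  · show PySem.List.pyGetD (PySem.List.pyGetD b sy []) sx 0 = pvRead b (ys : Int) (xs0 : Int)
    rw [hrowb, pvGetD_of_idx _ _ _ _ hxs', pvRead_natCast]

-- ---- port A's inner double loop, analysed one (pos, i) pair at a time ----

-- a nested 'for a: for b:' loop is the fold over the flattened pair list
theorem pvFoldl_flat {α β γ : Type} (l : List α) (m : List β) (f : γ → α → β → γ) (init : γ) :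
    l.foldl (fun s a => m.foldl (fun s b => f s a b) s) init
      = (l.flatMap (fun a => m.map (fun b => (a, b)))).foldl (fun s p => f s p.1 p.2) init := by
  induction l generalizing init with
  | nil => rfl
  | cons a l ih =>
    simp only [List.flatMap_cons, List.foldl_append, List.foldl_cons, List.foldl_map]
    rw [ih]

-- 'for pos in range(1, cnt): for i in range(4): …' flattened to one pair list
def pvPairs (cnt : Int) : List (Int × Int) :=
  (PySem.List.pyRange 1 cnt 1).flatMap (fun pos => (PySem.List.pyRange 0 4 1).map (fun i => (pos, i)))

theorem pvStepA_cases (h w : Nat) (y x : Int) (st : List (List Int) × List (Int × Int × Int))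
    (p : Int × Int) :
    let ny := y + PySem.List.pyGetD pvDy p.2 0 * p.1
    let nx := x + PySem.List.pyGetD pvDx p.2 0 * p.1
    ((ny < 0 ∨ nx < 0 ∨ ny ≥ (h : Int) ∨ nx ≥ (w : Int)) ∧ pvStepA h w y x st p = st) ∨
    (∃ rn cn : Nat, rn < h ∧ cn < w ∧ ny = (rn : Int) ∧ nx = (cn : Int) ∧
      ((pvRead st.1 (rn : Int) (cn : Int) = 0 ∧ pvStepA h w y x st p = st) ∨
       (pvRead st.1 (rn : Int) (cn : Int) ≠ 0 ∧
        pvStepA h w y x st p =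
          (pvWrite st.1 (rn : Int) (cn : Int) 0,
           st.2 ++ [((rn : Int), (cn : Int), pvRead st.1 (rn : Int) (cn : Int))])))) := by
  intro ny nx
  by_cases hb : ny < 0 ∨ nx < 0 ∨ ny ≥ (h : Int) ∨ nx ≥ (w : Int)
  · left
    refine ⟨hb, ?_⟩
    unfold pvStepA
    rw [if_pos hb]
  · right
    refine ⟨ny.toNat, nx.toNat, by omega, by omega, by omega, by omega, ?_⟩
    have hny : ((ny.toNat : Nat) : Int) = ny := by omega
    have hnx : ((nx.toNat : Nat) : Int) = nx := by omega
    rw [hny, hnx]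
    by_cases hz : pvRead st.1 ny nx = 0
    · left
      refine ⟨hz, ?_⟩
      unfold pvStepA
      rw [if_neg hb, if_pos hz]
    · right
      refine ⟨hz, ?_⟩
      unfold pvStepA
      rw [if_neg hb, if_neg hz]

-- (pos, i) pairs of A's double loop
theorem pvMem_pvPairs {cnt : Int} {p : Int × Int} :
    p ∈ pvPairs cnt ↔ 1 ≤ p.1 ∧ p.1 < cnt ∧ 0 ≤ p.2 ∧ p.2 < 4 := by
  unfold pvPairs
  simp only [List.mem_flatMap, List.mem_map, PySem.List.mem_pyRange_one]
  constructor
  · rintro ⟨pos, ⟨hp1, hp2⟩, i, ⟨hi1, hi2⟩, rfl⟩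
    exact ⟨hp1, hp2, hi1, hi2⟩
  · rintro ⟨h1, h2, h3, h4⟩
    exact ⟨p.1, ⟨h1, h2⟩, p.2, ⟨h3, h4⟩, rfl⟩

def pvScanGo (h w : Nat) (y x : Int) (l : List (Int × Int))
    (st : List (List Int) × List (Int × Int × Int)) : List (List Int) × List (Int × Int × Int) :=
  l.foldl (fun s p => pvStepA h w y x s p) st

theorem pvScanA_eq (h w : Nat) (b : List (List Int)) (y x cnt : Int) :
    pvScanA h w b y x cnt = pvScanGo h w y x (pvPairs cnt) (b, []) := by
  unfold pvScanA pvScanGo pvPairs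
  exact pvFoldl_flat _ _ (fun s pos i => pvStepA h w y x s (pos, i)) _

theorem pvScanGo_cons (h w : Nat) (y x : Int) (p : Int × Int) (l : List (Int × Int)) st :
    pvScanGo h w y x (p :: l) st = pvScanGo h w y x l (pvStepA h w y x st p) := rfl

-- everything one scan establishes, in one induction over the remaining (pos, i) pairs
theorem pvScanGo_spec (h w : Nat) (b1 : List (List Int)) (sy sx v0 : Int)
    (hg1 : pvGrid b1 h w) (y x cnt : Int)
    (hR : pvReach h w b1 sy sx v0 y x cnt) :
    ∀ (l : List (Int × Int)) (st : List (List Int) × List (Int × Int × Int)),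
      (∀ p ∈ l, 1 ≤ p.1 ∧ p.1 < cnt ∧ 0 ≤ p.2 ∧ p.2 < 4) →
      pvShape st.1 = pvShape b1 →
      (∀ it ∈ st.2, pvReach h w b1 sy sx v0 it.1 it.2.1 it.2.2 ∧ pvRead st.1 it.1 it.2.1 = 0) →
      (∀ r c : Nat, r < h → c < w →
        pvRead st.1 (r : Int) (c : Int) = pvRead b1 (r : Int) (c : Int) ∨
        pvRead st.1 (r : Int) (c : Int) = 0) →
      pvShape (pvScanGo h w y x l st).1 = pvShape b1 ∧
      (∀ y' x' : Int, pvRead st.1 y' x' = 0 → pvRead (pvScanGo h w y x l st).1 y' x' = 0) ∧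
      (∀ r c : Nat, r < h → c < w →
        pvRead (pvScanGo h w y x l st).1 (r : Int) (c : Int) = pvRead st.1 (r : Int) (c : Int) ∨
        pvRead (pvScanGo h w y x l st).1 (r : Int) (c : Int) = 0) ∧
      (∀ it ∈ (pvScanGo h w y x l st).2,
        pvReach h w b1 sy sx v0 it.1 it.2.1 it.2.2 ∧
        pvRead (pvScanGo h w y x l st).1 it.1 it.2.1 = 0) ∧
      (pvNz h w (pvScanGo h w y x l st).1 + (pvScanGo h w y x l st).2.length
        = pvNz h w st.1 + st.2.length) ∧
      (∃ news, (pvScanGo h w y x l st).2 = st.2 ++ news) ∧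
      (∀ p ∈ l, ∀ rn cn : Nat, rn < h → cn < w →
        y + PySem.List.pyGetD pvDy p.2 0 * p.1 = (rn : Int) →
        x + PySem.List.pyGetD pvDx p.2 0 * p.1 = (cn : Int) →
        pvRead (pvScanGo h w y x l st).1 (rn : Int) (cn : Int) = 0) ∧
      (∀ r c : Nat, r < h → c < w → pvRead (pvScanGo h w y x l st).1 (r : Int) (c : Int) = 0 →
        pvRead st.1 (r : Int) (c : Int) = 0 ∨
        (((r : Int), (c : Int), pvRead b1 (r : Int) (c : Int)) : Int × Int × Int)
          ∈ (pvScanGo h w y x l st).2) := by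
  intro l
  induction l with
  | nil =>
    intro st _ hshape hitems h2
    have he : pvScanGo h w y x [] st = st := rfl
    rw [he]
    refine ⟨hshape, fun _ _ hz => hz, fun r c _ _ => Or.inl rfl, hitems, rfl, ⟨[], by simp⟩,
      fun p hp => by simp at hp, fun r c _ _ hz => Or.inl hz⟩
  | cons p l ih =>
    intro st hl hshape hitems h2
    have hp := hl p List.mem_cons_self
    have hl' : ∀ q ∈ l, 1 ≤ q.1 ∧ q.1 < cnt ∧ 0 ≤ q.2 ∧ q.2 < 4 :=
      fun q hq => hl q (List.mem_cons_of_mem _ hq)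
    rw [pvScanGo_cons]
    rcases pvStepA_cases h w y x st p with ⟨hob, heq⟩ | ⟨rn, cn, hrn, hcn, hny, hnx, hcase⟩
    · -- out of bounds: state unchanged
      rw [heq]
      obtain ⟨c1, c2, c3, c4, c5, c6, c7, c8⟩ := ih st hl' hshape hitems h2
      refine ⟨c1, c2, c3, c4, c5, c6, ?_, c8⟩
      intro q hq rn cn hrnh hcnw hyq hxq
      rcases List.mem_cons.mp hq with rfl | hq'
      · exfalso; rw [hyq, hxq] at hob; omega
      · exact c7 q hq' rn cn hrnh hcnw hyq hxq
    · rcases hcase with ⟨hz, heq⟩ | ⟨hnz, heq⟩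
      · -- neighbour already zero: state unchanged
        rw [heq]
        obtain ⟨c1, c2, c3, c4, c5, c6, c7, c8⟩ := ih st hl' hshape hitems h2
        refine ⟨c1, c2, c3, c4, c5, c6, ?_, c8⟩
        intro q hq rn' cn' hrnh hcnw hyq hxq
        rcases List.mem_cons.mp hq with rfl | hq'
        · have e1 : rn' = rn := by omega
          have e2 : cn' = cn := by omega
          subst e1; subst e2
          exact c2 _ _ hz
        · exact c7 q hq' rn' cn' hrnh hcnw hyq hxq
      · -- fire: zero the neighbour and append it to the out-list
        have hgst : pvGrid st.1 h w := pvGrid_of_shape hg1 hshape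
        obtain ⟨hlen, hrow⟩ := pvGrid_write_ok hgst hrn hcn
        have hb1v : pvRead st.1 (rn : Int) (cn : Int) = pvRead b1 (rn : Int) (cn : Int) := by
          rcases h2 rn cn hrn hcn with he | he
          · exact he
          · exact absurd he hnz
        have hkidR : pvReach h w b1 sy sx v0 (rn : Int) (cn : Int)
            (pvRead st.1 (rn : Int) (cn : Int)) := by
          rw [hb1v, ← hny, ← hnx]
          exact pvReach.step hR hp.1 hp.2.1 (pvDir_of_idx hp.2.2.1 hp.2.2.2)
            (by omega) (by omega) (by omega) (by omega) (by rw [hny, hnx, ← hb1v]; exact hnz)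
        set st2 : List (List Int) × List (Int × Int × Int) :=
          (pvWrite st.1 (rn : Int) (cn : Int) 0,
           st.2 ++ [((rn : Int), (cn : Int), pvRead st.1 (rn : Int) (cn : Int))]) with hst2
        have hsh2 : pvShape st2.1 = pvShape b1 := by
          rw [hst2]; rw [pvShape_pvWrite]; exact hshape
        have hit2 : ∀ it ∈ st2.2, pvReach h w b1 sy sx v0 it.1 it.2.1 it.2.2 ∧
            pvRead st2.1 it.1 it.2.1 = 0 := by
          intro it hit
          rcases List.mem_append.mp hit with hold | hnew
          · obtain ⟨hr1, hr2⟩ := hitems it hold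
            exact ⟨hr1, pvRead_zero_persist _ _ _ _ _ hr2⟩
          · rcases List.mem_singleton.mp hnew with rfl
            refine ⟨hkidR, ?_⟩
            show pvRead (pvWrite st.1 (rn : Int) (cn : Int) 0) (rn : Int) (cn : Int) = 0
            rw [pvRead_pvWrite_nat st.1 rn cn 0 hlen hrow]
            simp
        have h22 : ∀ r c : Nat, r < h → c < w →
            pvRead st2.1 (r : Int) (c : Int) = pvRead b1 (r : Int) (c : Int) ∨
            pvRead st2.1 (r : Int) (c : Int) = 0 := by
          intro r c hr hc
          rw [hst2]
          show pvRead (pvWrite st.1 (rn : Int) (cn : Int) 0) (r : Int) (c : Int) = _ ∨ _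
          rw [pvRead_pvWrite_nat st.1 rn cn 0 hlen hrow]
          split
          · exact Or.inr rfl
          · exact h2 r c hr hc
        rw [heq]
        obtain ⟨c1, c2, c3, c4, c5, c6, c7, c8⟩ := ih st2 hl' hsh2 hit2 h22
        have hzero2 : pvRead st2.1 (rn : Int) (cn : Int) = 0 := by
          rw [hst2]
          show pvRead (pvWrite st.1 (rn : Int) (cn : Int) 0) (rn : Int) (cn : Int) = 0
          rw [pvRead_pvWrite_nat st.1 rn cn 0 hlen hrow]
          simp
        refine ⟨c1, ?_, ?_, c4, ?_, ?_, ?_, ?_⟩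
        · -- zeros persist
          intro y' x' hz'
          exact c2 y' x' (pvRead_zero_persist _ _ _ _ _ hz')
        · -- reads only drop to zero
          intro r c hr hc
          rcases c3 r c hr hc with he | he
          · rw [hst2] at he
            rw [he, pvRead_pvWrite_nat st.1 rn cn 0 hlen hrow]
            split
            · exact Or.inr rfl
            · exact Or.inl rfl
          · exact Or.inr he
        · -- the nonzero-cell count books balance
          have hnzw : pvNz h w st2.1 + 1 = pvNz h w st.1 :=
            pvNz_write0 hrn hcn hnz hlen hrow
          have hlen2 : st2.2.length = st.2.length + 1 := by rw [hst2]; simp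
          omega
        · -- out-list only grows
          obtain ⟨news, hnews⟩ := c6
          exact ⟨[((rn : Int), (cn : Int), pvRead st.1 (rn : Int) (cn : Int))] ++ news,
            by rw [hnews, hst2]; simp⟩
        · -- every visited in-bounds neighbour ends up zero
          intro q hq rn' cn' hrnh hcnw hyq hxq
          rcases List.mem_cons.mp hq with rfl | hq'
          · have e1 : rn' = rn := by omega
            have e2 : cn' = cn := by omega
            subst e1; subst e2
            exact c2 _ _ hzero2
          · exact c7 q hq' rn' cn' hrnh hcnw hyq hxq
        · -- any newly zeroed cell is recorded in the out-list
          intro r c hr hc hz'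
          rcases c8 r c hr hc hz' with he | he
          · rw [hst2] at he
            rw [pvRead_pvWrite_nat st.1 rn cn 0 hlen hrow] at he
            by_cases hrc : r = rn ∧ c = cn
            · right
              obtain ⟨news, hnews⟩ := c6
              rw [hnews, hst2]
              obtain ⟨rfl, rfl⟩ := hrc
              rw [← hb1v]
              simp
            · rw [if_neg hrc] at he
              exact Or.inl he
          · exact Or.inr he

-- ---- the BFS loop invariant and its preservation ----

def pvInvA (h w : Nat) (b1 : List (List Int)) (sy sx v0 : Int)
    (b : List (List Int)) (q : List (Int × Int × Int)) : Prop :=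
  pvShape b = pvShape b1 ∧
  (∀ r c : Nat, r < h → c < w →
    pvRead b (r : Int) (c : Int) = pvRead b1 (r : Int) (c : Int) ∨
    pvRead b (r : Int) (c : Int) = 0) ∧
  (∀ r c : Nat, r < h → c < w → pvRead b (r : Int) (c : Int) = 0 →
    pvRead b1 (r : Int) (c : Int) = 0 ∨
    ∃ v, pvReach h w b1 sy sx v0 (r : Int) (c : Int) v) ∧
  (∀ it ∈ q, pvReach h w b1 sy sx v0 it.1 it.2.1 it.2.2 ∧ pvRead b it.1 it.2.1 = 0) ∧
  pvRead b sy sx = 0 ∧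
  (∀ y x v, pvReach h w b1 sy sx v0 y x v → pvRead b y x = 0 → (y, x, v) ∉ q →
    ∀ pos dyv dxv : Int, 1 ≤ pos → pos < v → (dyv, dxv) ∈ pvDirs →
      0 ≤ y + dyv * pos → y + dyv * pos < (h : Int) →
      0 ≤ x + dxv * pos → x + dxv * pos < (w : Int) →
      pvRead b (y + dyv * pos) (x + dxv * pos) = 0)

theorem pvBfsA_run (h w : Nat) (b1 : List (List Int)) (sy sx v0 : Int)
    (hg1 : pvGrid b1 h w) :
    ∀ (fuel : Nat) (b : List (List Int)) (q : List (Int × Int × Int)),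
      pvInvA h w b1 sy sx v0 b q → q.length + pvNz h w b ≤ fuel →
      pvInvA h w b1 sy sx v0 (pvBfsA h w fuel b q) [] := by
  intro fuel
  induction fuel with
  | zero =>
    intro b q hinv hm
    have hq : q = [] := List.eq_nil_of_length_eq_zero (by omega)
    subst hq
    exact hinv
  | succ fuel ih =>
    intro b q hinv hm
    match q with
    | [] => exact hinv
    | (y, x, cnt) :: q =>
      obtain ⟨i1, i2, i3, i4, i5, i6⟩ := hinv
      have hpop := i4 (y, x, cnt) List.mem_cons_self
      have hR : pvReach h w b1 sy sx v0 y x cnt := hpop.1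
      show pvInvA h w b1 sy sx v0
        (pvBfsA h w fuel (pvScanA h w b y x cnt).1 (q ++ (pvScanA h w b y x cnt).2)) []
      rw [pvScanA_eq]
      obtain ⟨c1, c2, c3, c4, c5, c6, c7, c8⟩ :=
        pvScanGo_spec h w b1 sy sx v0 hg1 y x cnt hR (pvPairs cnt) (b, [])
          (fun p hp => pvMem_pvPairs.mp hp) i1 (by simp) i2
      set st' := pvScanGo h w y x (pvPairs cnt) (b, []) with hst'
      apply ih
      · refine ⟨c1, ?_, ?_, ?_, ?_, ?_⟩
        · -- reads are original-or-zero
          intro r c hr hc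
          rcases c3 r c hr hc with he | he
          · rw [he]; exact i2 r c hr hc
          · exact Or.inr he
        · -- zeroed cells are originally-zero or reached
          intro r c hr hc hz
          rcases c8 r c hr hc hz with he | he
          · exact i3 r c hr hc he
          · obtain ⟨hRk, _⟩ := c4 _ he
            exact Or.inr ⟨_, hRk⟩
        · -- queue items are reached, their cells zero
          intro it hit
          rcases List.mem_append.mp hit with hold | hnew
          · obtain ⟨hr1, hr2⟩ := i4 it (List.mem_cons_of_mem _ hold)
            exact ⟨hr1, c2 _ _ hr2⟩
          · exact c4 it hnew
        · -- the start cell stays zero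
          exact c2 _ _ i5
        · -- processed items have all their in-bounds neighbours zero
          intro y' x' v' hR' hz' hnq pos dyv dxv hp1 hp2 hd hy0 hyh hx0 hxw
          by_cases hpopd : (y', x', v') = ((y, x, cnt) : Int × Int × Int)
          · -- the item just popped: the scan closed it
            have e := hpopd
            rw [Prod.ext_iff, Prod.ext_iff] at e
            obtain ⟨e1, e2, e3⟩ := e
            dsimp only at e1 e2 e3
            obtain ⟨i, hi0, hi4, hdy, hdx⟩ := pvIdx_of_dir hd
            have hmem : ((pos, i) : Int × Int) ∈ pvPairs cnt :=
              pvMem_pvPairs.mpr ⟨hp1, by omega, hi0, hi4⟩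
            have hcy : y + PySem.List.pyGetD pvDy i 0 * pos = (((y' + dyv * pos).toNat : Nat) : Int) := by
              rw [hdy, ← e1]; omega
            have hcx : x + PySem.List.pyGetD pvDx i 0 * pos = (((x' + dxv * pos).toNat : Nat) : Int) := by
              rw [hdx, ← e2]; omega
            have hc := c7 (pos, i) hmem (y' + dyv * pos).toNat (x' + dxv * pos).toNat
              (by omega) (by omega) hcy hcx
            have eny : (((y' + dyv * pos).toNat : Nat) : Int) = y' + dyv * pos := by omega
            have enx : (((x' + dxv * pos).toNat : Nat) : Int) = x' + dxv * pos := by omega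
            rw [eny, enx] at hc
            exact hc
          · by_cases hzb : pvRead b y' x' = 0
            · -- previously processed: old invariant, zeros persist
              have hnq' : (y', x', v') ∉ ((y, x, cnt) :: q : List (Int × Int × Int)) := by
                intro hmem
                rcases List.mem_cons.mp hmem with he | he
                · exact hpopd he
                · exact hnq (List.mem_append_left _ he)
              exact c2 _ _ (i6 y' x' v' hR' hzb hnq' pos dyv dxv hp1 hp2 hd hy0 hyh hx0 hxw)
            · -- newly zeroed this scan: then it is one of the new kids — contradiction
              exfalso
              rcases pvReach_val hR' with ⟨rfl, rfl, rfl⟩ | ⟨rn, cn, hey, hex, hrn, hcn, hev, _⟩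
              · exact hzb i5
              · subst hey; subst hex
                rcases c8 rn cn hrn hcn hz' with he | he
                · exact hzb he
                · rw [← hev] at he
                  exact hnq (List.mem_append_right _ he)
      · -- the fuel bound: one item popped, books balance
        have : pvNz h w st'.1 + st'.2.length = pvNz h w b := by simpa using c5
        have hlq : (q ++ st'.2).length = q.length + st'.2.length := by simp
        simp only [List.length_cons] at hm
        omega

-- ---- once a board is closed under the blast rule, reached cells are zero ----
theorem pvClosed_char (h w : Nat) (b1 : List (List Int)) (sy sx v0 : Int)
    (b : List (List Int))
    (i2 : ∀ r c : Nat, r < h → c < w →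
      pvRead b (r : Int) (c : Int) = pvRead b1 (r : Int) (c : Int) ∨
      pvRead b (r : Int) (c : Int) = 0)
    (i3 : ∀ r c : Nat, r < h → c < w → pvRead b (r : Int) (c : Int) = 0 →
      pvRead b1 (r : Int) (c : Int) = 0 ∨
      ∃ v, pvReach h w b1 sy sx v0 (r : Int) (c : Int) v)
    (i5 : pvRead b sy sx = 0)
    (hcl : ∀ y x v, pvReach h w b1 sy sx v0 y x v → pvRead b y x = 0 →
      ∀ pos dyv dxv : Int, 1 ≤ pos → pos < v → (dyv, dxv) ∈ pvDirs →
        0 ≤ y + dyv * pos → y + dyv * pos < (h : Int) →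
        0 ≤ x + dxv * pos → x + dxv * pos < (w : Int) →
        pvRead b (y + dyv * pos) (x + dxv * pos) = 0) :
    ∀ r c : Nat, r < h → c < w →
      ((∃ v, pvReach h w b1 sy sx v0 (r : Int) (c : Int) v) → pvRead b (r : Int) (c : Int) = 0) ∧
      (¬ (∃ v, pvReach h w b1 sy sx v0 (r : Int) (c : Int) v) →
        pvRead b (r : Int) (c : Int) = pvRead b1 (r : Int) (c : Int)) := by
  have haux : ∀ y x v, pvReach h w b1 sy sx v0 y x v → pvRead b y x = 0 := by
    intro y x v hR
    induction hR with
    | base => exact i5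
    | step hR' h1 h2 hd hy0 hyh hx0 hxw hnz ih =>
      exact hcl _ _ _ hR' ih _ _ _ h1 h2 hd hy0 hyh hx0 hxw
  intro r c hr hc
  constructor
  · rintro ⟨v, hv⟩
    exact haux _ _ _ hv
  · intro hnR
    rcases i2 r c hr hc with he | he
    · exact he
    · rcases i3 r c hr hc he with hz | hz
      · rw [he, hz]
      · exact absurd hz hnR

-- ---- port B's recursive explosion, analysed one (pos, dir) pair at a time ----

-- a blast-closed cell: every in-grid cell in its radius is zero
def pvClosedAt (h w : Nat) (b : List (List Int)) (y x v : Int) : Prop :=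
  ∀ pos dyv dxv : Int, 1 ≤ pos → pos < v → (dyv, dxv) ∈ pvDirs →
    0 ≤ y + dyv * pos → y + dyv * pos < (h : Int) →
    0 ≤ x + dxv * pos → x + dxv * pos < (w : Int) →
    pvRead b (y + dyv * pos) (x + dxv * pos) = 0

theorem pvClosedAt_mono {h w : Nat} {b b' : List (List Int)} {y x v : Int}
    (hz : ∀ y' x' : Int, pvRead b y' x' = 0 → pvRead b' y' x' = 0)
    (hc : pvClosedAt h w b y x v) : pvClosedAt h w b' y x v :=
  fun pos dyv dxv h1 h2 hd hy0 hyh hx0 hxw =>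
    hz _ _ (hc pos dyv dxv h1 h2 hd hy0 hyh hx0 hxw)

def pvPairsB (v : Int) : List (Int × (Int × Int)) :=
  (PySem.List.pyRange 1 v 1).flatMap (fun pos => pvDirs.map (fun d => (pos, d)))

theorem pvMem_pvPairsB {v : Int} {q : Int × (Int × Int)} :
    q ∈ pvPairsB v ↔ 1 ≤ q.1 ∧ q.1 < v ∧ q.2 ∈ pvDirs := by
  unfold pvPairsB
  simp only [List.mem_flatMap, List.mem_map, PySem.List.mem_pyRange_one]
  constructor
  · rintro ⟨pos, ⟨hp1, hp2⟩, d, hd, rfl⟩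
    exact ⟨hp1, hp2, hd⟩
  · rintro ⟨h1, h2, h3⟩
    exact ⟨q.1, ⟨h1, h2⟩, q.2, h3, rfl⟩

-- one flattened (pos, dir) step of B's explode body
def pvExpStep (h w fuel : Nat) (y x : Int) (b : List (List Int)) (q : Int × (Int × Int)) :
    List (List Int) :=
  let ny := y + q.2.1 * q.1
  let nx := x + q.2.2 * q.1
  if 0 ≤ ny ∧ ny < (h : Int) ∧ 0 ≤ nx ∧ nx < (w : Int) ∧ pvRead b ny nx ≠ 0 then
    pvExplode h w fuel (pvWrite b ny nx 0) ny nx (pvRead b ny nx)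
  else b

def pvExpGo (h w fuel : Nat) (y x : Int) (l : List (Int × (Int × Int)))
    (b : List (List Int)) : List (List Int) :=
  l.foldl (pvExpStep h w fuel y x) b

theorem pvExplode_succ (h w fuel : Nat) (b : List (List Int)) (y x cnt : Int) :
    pvExplode h w (fuel + 1) b y x cnt = pvExpGo h w fuel y x (pvPairsB cnt) b := by
  show (PySem.List.pyRange 1 cnt 1).foldl _ b = _
  unfold pvExpGo pvPairsB
  exact pvFoldl_flat _ _ (fun b pos d => pvExpStep h w fuel y x b (pos, d)) b

theorem pvExpGo_cons (h w fuel : Nat) (y x : Int) (q : Int × (Int × Int))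
    (l : List (Int × (Int × Int))) (b : List (List Int)) :
    pvExpGo h w fuel y x (q :: l) b = pvExpGo h w fuel y x l (pvExpStep h w fuel y x b q) := rfl

theorem pvExpStep_cases (h w fuel : Nat) (y x : Int) (b : List (List Int))
    (q : Int × (Int × Int)) :
    let ny := y + q.2.1 * q.1
    let nx := x + q.2.2 * q.1
    (¬ (0 ≤ ny ∧ ny < (h : Int) ∧ 0 ≤ nx ∧ nx < (w : Int)) ∧ pvExpStep h w fuel y x b q = b) ∨
    (∃ rn cn : Nat, rn < h ∧ cn < w ∧ ny = (rn : Int) ∧ nx = (cn : Int) ∧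
      ((pvRead b (rn : Int) (cn : Int) = 0 ∧ pvExpStep h w fuel y x b q = b) ∨
       (pvRead b (rn : Int) (cn : Int) ≠ 0 ∧
        pvExpStep h w fuel y x b q =
          pvExplode h w fuel (pvWrite b (rn : Int) (cn : Int) 0) (rn : Int) (cn : Int)
            (pvRead b (rn : Int) (cn : Int))))) := by
  intro ny nx
  by_cases hb : 0 ≤ ny ∧ ny < (h : Int) ∧ 0 ≤ nx ∧ nx < (w : Int)
  · right
    refine ⟨ny.toNat, nx.toNat, by omega, by omega, by omega, by omega, ?_⟩
    have hny : ((ny.toNat : Nat) : Int) = ny := by omega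
    have hnx : ((nx.toNat : Nat) : Int) = nx := by omega
    rw [hny, hnx]
    by_cases hz : pvRead b ny nx = 0
    · left
      refine ⟨hz, ?_⟩
      unfold pvExpStep
      rw [if_neg (fun hcon => hcon.2.2.2.2 hz)]
    · right
      refine ⟨hz, ?_⟩
      unfold pvExpStep
      rw [if_pos ⟨hb.1, hb.2.1, hb.2.2.1, hb.2.2.2, hz⟩]
  · left
    refine ⟨hb, ?_⟩
    unfold pvExpStep
    rw [if_neg (by tauto)]

-- everything one explode call establishes: shape kept, zeros persist, reads only drop
-- to zero, zeroed cells are reached, the call's own cell and every cell it newly zeroes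
-- end up blast-closed
theorem pvExplode_spec (h w : Nat) (b1 : List (List Int)) (sy sx v0 : Int)
    (hg1 : pvGrid b1 h w) :
    ∀ (fuel : Nat) (b : List (List Int)) (y x cnt : Int),
      pvShape b = pvShape b1 →
      (∀ r c : Nat, r < h → c < w →
        pvRead b (r : Int) (c : Int) = pvRead b1 (r : Int) (c : Int) ∨
        pvRead b (r : Int) (c : Int) = 0) →
      (∀ r c : Nat, r < h → c < w → pvRead b (r : Int) (c : Int) = 0 →
        pvRead b1 (r : Int) (c : Int) = 0 ∨
        ∃ v, pvReach h w b1 sy sx v0 (r : Int) (c : Int) v) →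
      pvReach h w b1 sy sx v0 y x cnt →
      pvNz h w b + 1 ≤ fuel →
      pvShape (pvExplode h w fuel b y x cnt) = pvShape b1 ∧
      (∀ y' x' : Int, pvRead b y' x' = 0 → pvRead (pvExplode h w fuel b y x cnt) y' x' = 0) ∧
      (∀ r c : Nat, r < h → c < w →
        pvRead (pvExplode h w fuel b y x cnt) (r : Int) (c : Int)
          = pvRead b (r : Int) (c : Int) ∨
        pvRead (pvExplode h w fuel b y x cnt) (r : Int) (c : Int) = 0) ∧
      (∀ r c : Nat, r < h → c < w →
        pvRead (pvExplode h w fuel b y x cnt) (r : Int) (c : Int) = 0 →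
        pvRead b1 (r : Int) (c : Int) = 0 ∨
        ∃ v, pvReach h w b1 sy sx v0 (r : Int) (c : Int) v) ∧
      pvNz h w (pvExplode h w fuel b y x cnt) ≤ pvNz h w b ∧
      pvClosedAt h w (pvExplode h w fuel b y x cnt) y x cnt ∧
      (∀ r c : Nat, r < h → c < w →
        pvRead (pvExplode h w fuel b y x cnt) (r : Int) (c : Int) = 0 →
        pvRead b (r : Int) (c : Int) ≠ 0 →
        pvClosedAt h w (pvExplode h w fuel b y x cnt) (r : Int) (c : Int)
          (pvRead b1 (r : Int) (c : Int))) := by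
  intro fuel
  induction fuel with
  | zero =>
    intro b y x cnt _ _ _ _ hm
    omega
  | succ fuel ih =>
    intro b y x cnt hsh hro hzr hR hm
    rw [pvExplode_succ]
    have main : ∀ (l : List (Int × (Int × Int))) (b : List (List Int)),
        (∀ q ∈ l, 1 ≤ q.1 ∧ q.1 < cnt ∧ q.2 ∈ pvDirs) →
        pvShape b = pvShape b1 →
        (∀ r c : Nat, r < h → c < w →
          pvRead b (r : Int) (c : Int) = pvRead b1 (r : Int) (c : Int) ∨
          pvRead b (r : Int) (c : Int) = 0) →
        (∀ r c : Nat, r < h → c < w → pvRead b (r : Int) (c : Int) = 0 →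
          pvRead b1 (r : Int) (c : Int) = 0 ∨
          ∃ v, pvReach h w b1 sy sx v0 (r : Int) (c : Int) v) →
        pvNz h w b ≤ fuel →
        pvShape (pvExpGo h w fuel y x l b) = pvShape b1 ∧
        (∀ y' x' : Int, pvRead b y' x' = 0 → pvRead (pvExpGo h w fuel y x l b) y' x' = 0) ∧
        (∀ r c : Nat, r < h → c < w →
          pvRead (pvExpGo h w fuel y x l b) (r : Int) (c : Int)
            = pvRead b (r : Int) (c : Int) ∨
          pvRead (pvExpGo h w fuel y x l b) (r : Int) (c : Int) = 0) ∧
        (∀ r c : Nat, r < h → c < w →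
          pvRead (pvExpGo h w fuel y x l b) (r : Int) (c : Int) = 0 →
          pvRead b1 (r : Int) (c : Int) = 0 ∨
          ∃ v, pvReach h w b1 sy sx v0 (r : Int) (c : Int) v) ∧
        pvNz h w (pvExpGo h w fuel y x l b) ≤ pvNz h w b ∧
        (∀ q ∈ l, 0 ≤ y + q.2.1 * q.1 → y + q.2.1 * q.1 < (h : Int) →
          0 ≤ x + q.2.2 * q.1 → x + q.2.2 * q.1 < (w : Int) →
          pvRead (pvExpGo h w fuel y x l b) (y + q.2.1 * q.1) (x + q.2.2 * q.1) = 0) ∧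
        (∀ r c : Nat, r < h → c < w →
          pvRead (pvExpGo h w fuel y x l b) (r : Int) (c : Int) = 0 →
          pvRead b (r : Int) (c : Int) ≠ 0 →
          pvClosedAt h w (pvExpGo h w fuel y x l b) (r : Int) (c : Int)
            (pvRead b1 (r : Int) (c : Int))) := by
      intro l
      induction l with
      | nil =>
        intro b _ hsh' hro' hzr' _
        have he : pvExpGo h w fuel y x [] b = b := rfl
        rw [he]
        exact ⟨hsh', fun _ _ hz => hz, fun r c _ _ => Or.inl rfl, hzr', le_refl _,
          fun q hq => by simp at hq, fun r c hr hc hzg hne => absurd hzg hne⟩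
      | cons q l ihl =>
        intro b hl hsh' hro' hzr' hnzb
        have hq := hl q List.mem_cons_self
        have hl' : ∀ q' ∈ l, 1 ≤ q'.1 ∧ q'.1 < cnt ∧ q'.2 ∈ pvDirs :=
          fun q' hq' => hl q' (List.mem_cons_of_mem _ hq')
        rw [pvExpGo_cons]
        rcases pvExpStep_cases h w fuel y x b q with ⟨hob, heq⟩ |
          ⟨rn, cn, hrn, hcn, hny, hnx, hcase⟩
        · -- out of bounds: board unchanged
          rw [heq]
          obtain ⟨c1, c2, c3, c4, c5, c6, c7⟩ := ihl b hl' hsh' hro' hzr' hnzb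
          refine ⟨c1, c2, c3, c4, c5, ?_, c7⟩
          intro q' hq' hy0 hyh hx0 hxw
          rcases List.mem_cons.mp hq' with rfl | hmem
          · exact absurd ⟨hy0, hyh, hx0, hxw⟩ hob
          · exact c6 q' hmem hy0 hyh hx0 hxw
        · rcases hcase with ⟨hz, heq⟩ | ⟨hnz, heq⟩
          · -- neighbour already zero: board unchanged
            rw [heq]
            obtain ⟨c1, c2, c3, c4, c5, c6, c7⟩ := ihl b hl' hsh' hro' hzr' hnzb
            refine ⟨c1, c2, c3, c4, c5, ?_, c7⟩
            intro q' hq' hy0 hyh hx0 hxw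
            rcases List.mem_cons.mp hq' with rfl | hmem
            · rw [hny, hnx]
              exact c2 _ _ hz
            · exact c6 q' hmem hy0 hyh hx0 hxw
          · -- fire: zero the neighbour and recurse into it, then continue the fold
            have hgb : pvGrid b h w := pvGrid_of_shape hg1 hsh'
            obtain ⟨hlen, hrow⟩ := pvGrid_write_ok hgb hrn hcn
            have hb1v : pvRead b (rn : Int) (cn : Int) = pvRead b1 (rn : Int) (cn : Int) := by
              rcases hro' rn cn hrn hcn with he | he
              · exact he
              · exact absurd he hnz
            have hkidR : pvReach h w b1 sy sx v0 (rn : Int) (cn : Int)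
                (pvRead b (rn : Int) (cn : Int)) := by
              rw [hb1v, ← hny, ← hnx]
              exact pvReach.step hR hq.1 hq.2.1 hq.2.2
                (by omega) (by omega) (by omega) (by omega)
                (by rw [hny, hnx, ← hb1v]; exact hnz)
            set bw := pvWrite b (rn : Int) (cn : Int) 0 with hbw
            have hshw : pvShape bw = pvShape b1 := by rw [hbw, pvShape_pvWrite]; exact hsh'
            have hrow_w : ∀ r c : Nat, r < h → c < w →
                pvRead bw (r : Int) (c : Int)
                  = (if r = rn ∧ c = cn then 0 else pvRead b (r : Int) (c : Int)) := by
              intro r c _ _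
              rw [hbw, pvRead_pvWrite_nat b rn cn 0 hlen hrow]
            have hrow' : ∀ r c : Nat, r < h → c < w →
                pvRead bw (r : Int) (c : Int) = pvRead b1 (r : Int) (c : Int) ∨
                pvRead bw (r : Int) (c : Int) = 0 := by
              intro r c hr hc
              rw [hrow_w r c hr hc]
              split
              · exact Or.inr rfl
              · exact hro' r c hr hc
            have hzr'' : ∀ r c : Nat, r < h → c < w → pvRead bw (r : Int) (c : Int) = 0 →
                pvRead b1 (r : Int) (c : Int) = 0 ∨
                ∃ v, pvReach h w b1 sy sx v0 (r : Int) (c : Int) v := by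
              intro r c hr hc hz0
              rw [hrow_w r c hr hc] at hz0
              by_cases hrc : r = rn ∧ c = cn
              · obtain ⟨rfl, rfl⟩ := hrc
                exact Or.inr ⟨_, hkidR⟩
              · rw [if_neg hrc] at hz0
                exact hzr' r c hr hc hz0
            have hnzw : pvNz h w bw + 1 = pvNz h w b := pvNz_write0 hrn hcn hnz hlen hrow
            obtain ⟨e1, e2, e3, e4, e5, e6, e7⟩ :=
              ih bw (rn : Int) (cn : Int) (pvRead b (rn : Int) (cn : Int))
                hshw hrow' hzr'' hkidR (by omega)
            set b2 := pvExplode h w fuel bw (rn : Int) (cn : Int)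
              (pvRead b (rn : Int) (cn : Int)) with hb2
            have hro2 : ∀ r c : Nat, r < h → c < w →
                pvRead b2 (r : Int) (c : Int) = pvRead b1 (r : Int) (c : Int) ∨
                pvRead b2 (r : Int) (c : Int) = 0 := by
              intro r c hr hc
              rcases e3 r c hr hc with he | he
              · rw [he]; exact hrow' r c hr hc
              · exact Or.inr he
            rw [heq]
            obtain ⟨c1, c2, c3, c4, c5, c6, c7⟩ :=
              ihl b2 hl' e1 hro2 e4 (by omega)
            have hbw0 : ∀ y' x' : Int, pvRead b y' x' = 0 → pvRead bw y' x' = 0 :=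
              fun y' x' hz' => pvRead_zero_persist _ _ _ _ _ hz'
            have hzero2 : pvRead b2 (rn : Int) (cn : Int) = 0 := by
              apply e2
              rw [hrow_w rn cn hrn hcn, if_pos ⟨rfl, rfl⟩]
            refine ⟨c1, ?_, ?_, c4, by omega, ?_, ?_⟩
            · -- zeros persist
              intro y' x' hz'
              exact c2 y' x' (e2 y' x' (hbw0 y' x' hz'))
            · -- reads only drop to zero
              intro r c hr hc
              rcases c3 r c hr hc with he | he
              · rcases e3 r c hr hc with he2 | he2
                · rw [he, he2, hrow_w r c hr hc]
                  split
                  · exact Or.inr rfl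
                  · exact Or.inl rfl
                · rw [he, he2]; exact Or.inr rfl
              · exact Or.inr he
            · -- every visited in-bounds neighbour ends up zero
              intro q' hq' hy0 hyh hx0 hxw
              rcases List.mem_cons.mp hq' with rfl | hmem
              · rw [hny, hnx]
                exact c2 _ _ hzero2
              · exact c6 q' hmem hy0 hyh hx0 hxw
            · -- every newly zeroed cell is blast-closed at the end
              intro r c hr hc hzg hbnz
              by_cases h2z : pvRead b2 (r : Int) (c : Int) = 0
              · by_cases hwz : pvRead bw (r : Int) (c : Int) = 0
                · -- the cell is exactly the one just written: closed by its own call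
                  have hrc : r = rn ∧ c = cn := by
                    by_contra hcon
                    rw [hrow_w r c hr hc, if_neg hcon] at hwz
                    exact hbnz hwz
                  obtain ⟨rfl, rfl⟩ := hrc
                  refine pvClosedAt_mono c2 ?_
                  rw [← hb1v]
                  exact e6
                · -- newly zeroed inside the recursive call: its (g) closes it
                  exact pvClosedAt_mono c2 (e7 r c hr hc h2z hwz)
              · -- newly zeroed later in this fold: the tail's (g) closes it
                exact c7 r c hr hc hzg h2z
    obtain ⟨c1, c2, c3, c4, c5, c6, c7⟩ :=
      main (pvPairsB cnt) b (fun q hq => pvMem_pvPairsB.mp hq) hsh hro hzr (by omega)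
    refine ⟨c1, c2, c3, c4, c5, ?_, c7⟩
    -- the call's own cell is blast-closed: every pair of its radius was visited
    intro pos dyv dxv h1 h2 hd hy0 hyh hx0 hxw
    exact c6 (pos, (dyv, dxv)) (pvMem_pvPairsB.mpr ⟨h1, h2, hd⟩) hy0 hyh hx0 hxw

-- ---- the two gravity passes ----

def pvVals (cf : List (List Int)) (h : Nat) (c : Nat) : List Int :=
  ((List.range h).map (fun (r : Nat) => pvRead cf (r : Int) (c : Int))).filter (fun v => v != 0)

def pvCol (cf : List (List Int)) (h : Nat) (c : Nat) : List Int :=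
  List.replicate (h - (pvVals cf h c).length) 0 ++ pvVals cf h c

def pvRVals (cf : List (List Int)) (h : Nat) (c : Nat) : List Int :=
  ((List.range h).map (fun (j : Nat) => pvRead cf ((h : Int) - (j : Int) - 1) (c : Int))).filter
    (fun v => v != 0)

theorem pvVals_len_le (cf : List (List Int)) (h c : Nat) : (pvVals cf h c).length ≤ h := by
  calc (pvVals cf h c).length ≤ ((List.range h).map
      (fun (r : Nat) => pvRead cf (r : Int) (c : Int))).length := List.length_filter_le _ _
  _ = h := by simp

theorem pvRVals_eq_reverse (cf : List (List Int)) (h c : Nat) :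
    pvRVals cf h c = (pvVals cf h c).reverse := by
  unfold pvRVals pvVals
  rw [← List.filter_reverse]
  congr 1
  apply List.ext_getElem
  · simp
  · intro j hj1 hj2
    have hjh : j < h := by simpa using hj1
    rw [List.getElem_reverse]
    simp only [List.getElem_map, List.getElem_range, List.length_map, List.length_range]
    congr 1
    omega

-- survivors of the first k bottom-up scanned rows of column c
def pvRValsK (cf : List (List Int)) (h : Nat) (c : Nat) (k : Nat) : List Int :=
  ((List.range k).map (fun (j : Nat) => pvRead cf ((h : Int) - (j : Int) - 1) (c : Int))).filter
    (fun v => v != 0)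

theorem pvRValsK_len_le (cf : List (List Int)) (h c k : Nat) : (pvRValsK cf h c k).length ≤ k := by
  calc (pvRValsK cf h c k).length ≤ ((List.range k).map
      (fun (j : Nat) => pvRead cf ((h : Int) - (j : Int) - 1) (c : Int))).length := List.length_filter_le _ _
  _ = k := by simp

theorem pvRValsK_succ (cf : List (List Int)) (h c k : Nat) :
    pvRValsK cf h c (k + 1) = pvRValsK cf h c k ++
      (if pvRead cf ((h : Int) - (k : Int) - 1) (c : Int) ≠ 0
        then [pvRead cf ((h : Int) - (k : Int) - 1) (c : Int)] else []) := by
  unfold pvRValsK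
  rw [List.range_succ, List.map_append, List.filter_append]
  congr 1
  split
  · next hne => simp [List.filter, hne]
  · next hz => simp only [ne_eq, not_not] at hz; simp [List.filter, hz]

theorem pvRValsK_top (cf : List (List Int)) (h c : Nat) : pvRValsK cf h c h = pvRVals cf h c := rfl

-- the inner fold of A's gravity: one column, scanned bottom-up
theorem pvInnerA_spec (cf : List (List Int)) (h w : Nat) (c : Nat) (hc : c < w) :
    ∀ (k : Nat), k ≤ h → ∀ (nb : List (List Int)), pvGrid nb h w →
      ((List.range k).foldl
        (fun st (idxY : Nat) =>
          let v := pvRead cf ((h : Int) - (idxY : Int) - 1) (c : Int)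
          if v ≠ 0 then (pvWrite st.1 st.2 (c : Int) v, st.2 - 1) else st)
        (nb, (h : Int) - 1)).2 = (h : Int) - 1 - (pvRValsK cf h c k).length ∧
      pvShape ((List.range k).foldl
        (fun st (idxY : Nat) =>
          let v := pvRead cf ((h : Int) - (idxY : Int) - 1) (c : Int)
          if v ≠ 0 then (pvWrite st.1 st.2 (c : Int) v, st.2 - 1) else st)
        (nb, (h : Int) - 1)).1 = pvShape nb ∧
      ∀ r' c' : Nat, r' < h → c' < w →
        pvRead ((List.range k).foldl
          (fun st (idxY : Nat) =>
            let v := pvRead cf ((h : Int) - (idxY : Int) - 1) (c : Int)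
            if v ≠ 0 then (pvWrite st.1 st.2 (c : Int) v, st.2 - 1) else st)
          (nb, (h : Int) - 1)).1 (r' : Int) (c' : Int) =
        if c' = c ∧ h - (pvRValsK cf h c k).length ≤ r'
          then (pvRValsK cf h c k).getD (h - 1 - r') 0
          else pvRead nb (r' : Int) (c' : Int) := by
  intro k
  induction k with
  | zero =>
    intro _ nb hg
    refine ⟨by simp [pvRValsK], rfl, ?_⟩
    intro r' c' hr' hc'
    have hno : ¬ (c' = c ∧ h - (pvRValsK cf h c 0).length ≤ r') := by
      unfold pvRValsK
      simp only [List.range_zero, List.map_nil, List.filter_nil, List.length_nil, Nat.sub_zero]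
      intro ⟨_, hle⟩
      omega
    rw [if_neg hno]
    simp [List.range_zero]
  | succ k ih =>
    intro hk nb hg
    have hk' : k ≤ h := by omega
    obtain ⟨e1, e2, e3⟩ := ih hk' nb hg
    rw [List.range_succ, List.foldl_append, List.foldl_cons, List.foldl_nil]
    set stk := (List.range k).foldl
      (fun st (idxY : Nat) =>
        let v := pvRead cf ((h : Int) - (idxY : Int) - 1) (c : Int)
        if v ≠ 0 then (pvWrite st.1 st.2 (c : Int) v, st.2 - 1) else st)
      (nb, (h : Int) - 1) with hstk
    have hL := pvRValsK_len_le cf h c k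
    by_cases hvz : pvRead cf ((h : Int) - (k : Int) - 1) (c : Int) ≠ 0
    · have hsucc : pvRValsK cf h c (k + 1) = pvRValsK cf h c k ++
          [pvRead cf ((h : Int) - (k : Int) - 1) (c : Int)] := by
        rw [pvRValsK_succ, if_pos hvz]
      have hlsucc : (pvRValsK cf h c (k + 1)).length = (pvRValsK cf h c k).length + 1 := by
        rw [hsucc]; simp
      have hcy : stk.2 = ((h - 1 - (pvRValsK cf h c k).length : Nat) : Int) := by
        rw [e1]; omega
      have hgk : pvGrid stk.1 h w := by
        refine pvGrid_of_shape hg ?_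
        rw [e2]
      obtain ⟨hlen, hrow⟩ := pvGrid_write_ok hgk
        (show h - 1 - (pvRValsK cf h c k).length < h by omega) hc
      simp only [if_pos hvz]
      refine ⟨?_, ?_, ?_⟩
      · show stk.2 - 1 = _
        rw [e1, hlsucc]
        push_cast
        omega
      · show pvShape (pvWrite stk.1 stk.2 (c : Int) _) = pvShape nb
        rw [pvShape_pvWrite]
        exact e2
      · intro r' c' hr' hc'
        show pvRead (pvWrite stk.1 stk.2 (c : Int) _) (r' : Int) (c' : Int) = _
        rw [hcy, pvRead_pvWrite_nat stk.1 (h - 1 - (pvRValsK cf h c k).length) c _ hlen hrow r' c']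
        by_cases hhit : r' = h - 1 - (pvRValsK cf h c k).length ∧ c' = c
        · obtain ⟨he1, he2⟩ := hhit
          subst he1
          rw [if_pos ⟨rfl, he2⟩, if_pos ⟨he2, by rw [hlsucc]; omega⟩, hsucc]
          have hidx : h - 1 - (h - 1 - (pvRValsK cf h c k).length)
              = (pvRValsK cf h c k).length := by omega
          rw [hidx, List.getD_eq_getElem?_getD, List.getElem?_append_right (le_refl _)]
          simp
        · rw [if_neg (by tauto)]
          rw [e3 r' c' hr' hc']
          by_cases hc'c : c' = c
          · by_cases hge : h - (pvRValsK cf h c k).length ≤ r'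
            · rw [if_pos ⟨hc'c, hge⟩, if_pos ⟨hc'c, by rw [hlsucc]; omega⟩]
              rw [hsucc, List.getD_eq_getElem?_getD, List.getD_eq_getElem?_getD,
                List.getElem?_append_left (by omega)]
            · have hne : r' ≠ h - 1 - (pvRValsK cf h c k).length :=
                fun he => hhit ⟨he, hc'c⟩
              rw [if_neg (by tauto), if_neg (by rw [hlsucc]; intro ⟨_, hle⟩; omega)]
          · rw [if_neg (by tauto), if_neg (by tauto)]
    · simp only [if_neg hvz]
      have hsucc : pvRValsK cf h c (k + 1) = pvRValsK cf h c k := by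
        rw [pvRValsK_succ, if_neg hvz]
        simp
      rw [hsucc]
      exact ⟨e1, e2, e3⟩

-- ---- assembling A's gravity column by column ----

def pvEntryA (cf : List (List Int)) (h : Nat) (c r : Nat) : Int :=
  if h - (pvRVals cf h c).length ≤ r then (pvRVals cf h c).getD (h - 1 - r) 0 else 0

theorem pvOuterA_spec (cf : List (List Int)) (h w : Nat) :
    ∀ (colsL : List Nat) (nb : List (List Int)), (∀ c ∈ colsL, c < w) → colsL.Nodup →
      pvGrid nb h w →
      (∀ r' c' : Nat, r' < h → c' < w → c' ∈ colsL → pvRead nb (r' : Int) (c' : Int) = 0) →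
      pvShape (colsL.foldl
        (fun nb (idxX : Nat) =>
          ((List.range h).foldl
            (fun st (idxY : Nat) =>
              let v := pvRead cf ((h : Int) - (idxY : Int) - 1) (idxX : Int)
              if v ≠ 0 then (pvWrite st.1 st.2 (idxX : Int) v, st.2 - 1) else st)
            (nb, (h : Int) - 1)).1)
        nb) = pvShape nb ∧
      (∀ r' c' : Nat, r' < h → c' < w →
        pvRead (colsL.foldl
          (fun nb (idxX : Nat) =>
            ((List.range h).foldl
              (fun st (idxY : Nat) =>
                let v := pvRead cf ((h : Int) - (idxY : Int) - 1) (idxX : Int)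
                if v ≠ 0 then (pvWrite st.1 st.2 (idxX : Int) v, st.2 - 1) else st)
              (nb, (h : Int) - 1)).1)
          nb) (r' : Int) (c' : Int)
          = if c' ∈ colsL then pvEntryA cf h c' r' else pvRead nb (r' : Int) (c' : Int)) := by
  intro colsL
  induction colsL with
  | nil =>
    intro nb _ _ _ _
    exact ⟨rfl, fun r' c' _ _ => by simp⟩
  | cons c colsL ih =>
    intro nb hcw hnd hg hz
    have hc : c < w := hcw c List.mem_cons_self
    obtain ⟨e1, e2, e3⟩ := pvInnerA_spec cf h w c hc h (le_refl h) nb hg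
    rw [List.foldl_cons]
    set nb1 := ((List.range h).foldl
      (fun st (idxY : Nat) =>
        let v := pvRead cf ((h : Int) - (idxY : Int) - 1) (c : Int)
        if v ≠ 0 then (pvWrite st.1 st.2 (c : Int) v, st.2 - 1) else st)
      (nb, (h : Int) - 1)).1 with hnb1
    have hg1 : pvGrid nb1 h w := pvGrid_of_shape hg (by rw [e2])
    have hcn : c ∉ colsL := (List.nodup_cons.mp hnd).1
    have hz1 : ∀ r' c' : Nat, r' < h → c' < w → c' ∈ colsL →
        pvRead nb1 (r' : Int) (c' : Int) = 0 := by
      intro r' c' hr' hc' hmem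
      rw [e3 r' c' hr' hc', if_neg (by rintro ⟨rfl, _⟩; exact hcn hmem)]
      exact hz r' c' hr' hc' (List.mem_cons_of_mem _ hmem)
    obtain ⟨f1, f2⟩ := ih nb1 (fun c' hc' => hcw c' (List.mem_cons_of_mem _ hc'))
      (List.nodup_cons.mp hnd).2 hg1 hz1
    refine ⟨by rw [f1, e2], ?_⟩
    intro r' c' hr' hc'
    rw [f2 r' c' hr' hc']
    by_cases hmem : c' ∈ colsL
    · rw [if_pos hmem, if_pos (List.mem_cons_of_mem _ hmem)]
    · rw [if_neg hmem]
      by_cases hcc : c' = c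
      · subst hcc
        rw [if_pos List.mem_cons_self]
        rw [e3 r' c' hr' hc']
        rw [pvRValsK_top]
        unfold pvEntryA
        by_cases hge : h - (pvRVals cf h c').length ≤ r'
        · rw [if_pos ⟨rfl, hge⟩, if_pos hge]
        · rw [if_neg (by tauto), if_neg hge]
          exact hz r' c' hr' hc' List.mem_cons_self
      · rw [if_neg (by intro hmem'; rcases List.mem_cons.mp hmem' with he | he
            <;> [exact hcc he; exact hmem he])]
        rw [e3 r' c' hr' hc', if_neg (by tauto)]

theorem pvRead_replicate (h w r c : Nat) :
    pvRead (List.replicate h (List.replicate w (0 : Int))) (r : Int) (c : Int) = 0 := by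
  rw [pvRead_natCast]
  rcases Nat.lt_or_ge r h with hr | hr
  · have h1 : (List.replicate h (List.replicate w (0 : Int))).getD r [] = List.replicate w 0 := by
      rw [List.getD_eq_getElem?_getD, List.getElem?_replicate_of_lt hr]
      rfl
    rw [h1]
    rcases Nat.lt_or_ge c w with hc | hc
    · rw [List.getD_eq_getElem?_getD, List.getElem?_replicate_of_lt hc]
      rfl
    · rw [List.getD_eq_getElem?_getD, List.getElem?_eq_none_iff.mpr (by simpa using hc)]
      rfl
  · have h1 : (List.replicate h (List.replicate w (0 : Int))).getD r [] = [] := by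
      rw [List.getD_eq_getElem?_getD, List.getElem?_eq_none_iff.mpr (by simpa using hr)]
      rfl
    rw [h1]
    rfl

theorem pvGravityA_char (cf : List (List Int)) (h w : Nat) :
    pvShape (pvGravityA cf h w) = pvShape (List.replicate h (List.replicate w (0 : Int))) ∧
    ∀ r c : Nat, r < h → c < w →
      pvRead (pvGravityA cf h w) (r : Int) (c : Int) = pvEntryA cf h c r := by
  have hgr : pvGrid (List.replicate h (List.replicate w (0 : Int))) h w :=
    ⟨by simp, fun r hr => by
      rw [List.getD_eq_getElem?_getD, List.getElem?_replicate_of_lt hr]; simp⟩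
  obtain ⟨f1, f2⟩ := pvOuterA_spec cf h w (List.range w)
    (List.replicate h (List.replicate w (0 : Int)))
    (fun c hc => List.mem_range.mp hc) List.nodup_range hgr
    (fun r' c' _ _ _ => pvRead_replicate h w r' c')
  exact ⟨f1, fun r c hr hc => by
    have := f2 r c hr hc
    rw [if_pos (List.mem_range.mpr hc)] at this
    exact this⟩

-- ---- B's per-column rebuild, entry by entry ----

theorem pvColsB_eq (cf : List (List Int)) (h w : Nat) :
    pvColsB cf h w = (List.range w).map (fun cc => pvCol cf h cc) := rfl

theorem pvReadColsB (cf : List (List Int)) (h w : Nat) (r cc : Nat) (_hr : r < h) (hc : cc < w) :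
    pvRead (pvColsB cf h w) (cc : Int) (r : Int) = (pvCol cf h cc).getD r 0 := by
  rw [pvColsB_eq, pvRead_natCast]
  have h1 : ((List.range w).map (fun cc => pvCol cf h cc)).getD cc [] = pvCol cf h cc := by
    rw [List.getD_eq_getElem?_getD, List.getElem?_map, List.getElem?_range hc]
    rfl
  rw [h1]

-- the same settled column, from A's bottom-up scan and B's top-down rebuild
theorem pvEntry_eq (cfA cfB : List (List Int)) (h w : Nat)
    (F : ∀ r c : Nat, r < h → c < w →
      pvRead cfA (r : Int) (c : Int) = pvRead cfB (r : Int) (c : Int))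
    (r c : Nat) (hr : r < h) (hc : c < w) :
    pvEntryA cfA h c r = (pvCol cfB h c).getD r 0 := by
  have hvals : pvVals cfA h c = pvVals cfB h c := by
    unfold pvVals
    congr 1
    apply List.map_congr_left
    intro j hj
    exact F j c (List.mem_range.mp hj) hc
  have hrv : pvRVals cfA h c = (pvVals cfB h c).reverse := by
    rw [pvRVals_eq_reverse, hvals]
  have hL := pvVals_len_le cfB h c
  unfold pvEntryA pvCol
  rw [hrv]
  simp only [List.length_reverse]
  by_cases hge : h - (pvVals cfB h c).length ≤ r
  · rw [if_pos hge]
    have hidx : h - 1 - r < (pvVals cfB h c).length := by omega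
    rw [List.getD_eq_getElem?_getD, List.getElem?_reverse hidx,
      List.getD_eq_getElem?_getD, List.getElem?_append_right (by simp; omega)]
    simp only [List.length_replicate]
    congr 2
    omega
  · rw [if_neg hge]
    rw [List.getD_eq_getElem?_getD, List.getElem?_append_left (by simp; omega)]
    rw [List.getElem?_replicate_of_lt (by omega)]
    rfl

-- ---- putting it together ----

theorem pvGetD_eq_getElem' (b : List (List Int)) (r : Nat) (hr : r < b.length) :
    b.getD r [] = b[r] := by
  rw [List.getD_eq_getElem?_getD, List.getElem?_eq_getElem hr]
  rfl

theorem pvGetElem_read (b : List (List Int)) (r c : Nat) (hr : r < b.length)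
    (hc : c < b[r].length) : b[r][c] = pvRead b (r : Int) (c : Int) := by
  rw [pvRead_natCast, pvGetD_eq_getElem' b r hr, List.getD_eq_getElem?_getD,
    List.getElem?_eq_getElem hc]
  rfl

-- ===== VERDICT (by name: the statement is the Claim_ definition above) =====
theorem cal_wall_spec : Claim_equal_cal_wall := by
  intro board sy sx _ hpre
  obtain ⟨hne, hrows, hys, hxs⟩ := hpre
  unfold Spec_cal_wall
  have hgb : pvGrid board board.length (PySem.List.pyGetD board 0 []).length := by
    refine ⟨rfl, ?_⟩
    intro r hr
    have hmem : board.getD r [] ∈ board := by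
      rw [pvGetD_eq_getElem' board r hr]
      exact List.getElem_mem hr
    exact hrows _ hmem
  obtain ⟨ys, xs0, hysn, hxsn, hP⟩ := pvStart_norm board sy sx hys hxs
  set h := board.length with hh
  set w := (PySem.List.pyGetD board 0 []).length with hw
  set v0 := pvRead board sy sx with hv0
  set b1 := pvWrite board sy sx 0 with hb1
  have hshape1 : pvShape b1 = pvShape board := pvShape_pvWrite board sy sx 0
  have hg1 : pvGrid b1 h w := pvGrid_of_shape hgb hshape1
  have hwrite_eq : b1 = pvWrite board (ys : Int) (xs0 : Int) 0 := (hP board rfl).1 0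
  have hstart0 : pvRead b1 sy sx = 0 := by
    rw [(hP b1 hshape1).2, hwrite_eq,
      pvRead_pvWrite_nat board ys xs0 0 hysn hxsn ys xs0, if_pos ⟨rfl, rfl⟩]
  -- run A's BFS
  have invA0 : pvInvA h w b1 sy sx v0 b1 [(sy, sx, v0)] := by
    refine ⟨rfl, fun r c _ _ => Or.inl rfl, fun r c _ _ hz => Or.inl hz, ?_, hstart0, ?_⟩
    · intro it hit
      rcases List.mem_singleton.mp hit with rfl
      exact ⟨pvReach.base, hstart0⟩
    · intro y x v hR hz hnq pos dyv dxv _ _ _ _ _ _ _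
      rcases pvReach_val hR with ⟨rfl, rfl, rfl⟩ | ⟨rn, cn, _, _, _, _, hev, hvne⟩
      · exact absurd (List.mem_singleton.mpr rfl) hnq
      · rw [← hev] at hz
        exact absurd hz hvne
  obtain ⟨a1, a2, a3, a4, a5, a6⟩ :=
    pvBfsA_run h w b1 sy sx v0 hg1 (h * w + 1) b1 [(sy, sx, v0)] invA0
      (by have := pvNz_le h w b1; simp only [List.length_singleton]; omega)
  have charA := pvClosed_char h w b1 sy sx v0 (pvBfsA h w (h * w + 1) b1 [(sy, sx, v0)])
    a2 a3 a5 (fun y x v hR hz pos dyv dxv h1 h2 hd hy0 hyh hx0 hxw =>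
      a6 y x v hR hz (by simp) pos dyv dxv h1 h2 hd hy0 hyh hx0 hxw)
  -- run B's recursive explosion from the start cell
  obtain ⟨e1, e2, e3, e4, _, e6, e7⟩ :=
    pvExplode_spec h w b1 sy sx v0 hg1 (h * w + 1) b1 sy sx v0 rfl
      (fun r c _ _ => Or.inl rfl) (fun r c _ _ hz => Or.inl hz) pvReach.base
      (by have := pvNz_le h w b1; omega)
  have charB := pvClosed_char h w b1 sy sx v0 (pvExplode h w (h * w + 1) b1 sy sx v0)
    e3 e4 (e2 sy sx hstart0) ?hcl
  case hcl =>
    intro y2 x2 v hR2 hz2 pos dyv dxv hp1 hp2 hd hy0 hyh hx0 hxw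
    rcases pvReach_val hR2 with ⟨rfl, rfl, rfl⟩ | ⟨rn, cn, hey, hex, hrn, hcn, hev, hvne⟩
    · exact e6 pos dyv dxv hp1 hp2 hd hy0 hyh hx0 hxw
    · subst hey; subst hex
      have hb1nz : pvRead b1 (rn : Int) (cn : Int) ≠ 0 := by rw [← hev]; exact hvne
      have hcl' := e7 rn cn hrn hcn hz2 hb1nz
      rw [← hev] at hcl'
      exact hcl' pos dyv dxv hp1 hp2 hd hy0 hyh hx0 hxw
  -- the two exploded boards agree on the grid
  have F : ∀ r c : Nat, r < h → c < w →
      pvRead (pvBfsA h w (h * w + 1) b1 [(sy, sx, v0)]) (r : Int) (c : Int)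
        = pvRead (pvExplode h w (h * w + 1) b1 sy sx v0) (r : Int) (c : Int) := by
    intro r c hr hc
    by_cases hex : ∃ v, pvReach h w b1 sy sx v0 (r : Int) (c : Int) v
    · rw [(charA r c hr hc).1 hex, ((charB r c hr hc).1 hex)]
    · rw [(charA r c hr hc).2 hex, ((charB r c hr hc).2 hex)]
  -- the two gravity passes build the same board
  show pvGravityA (pvBfsA h w (h * w + 1) b1 [(sy, sx, v0)]) h w
    = (List.range h).map (fun (r : Nat) => (List.range w).map (fun (cc : Nat) =>
        pvRead (pvColsB (pvExplode h w (h * w + 1) b1 sy sx v0) h w) (cc : Int) (r : Int)))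
  obtain ⟨g1, g2⟩ := pvGravityA_char (pvBfsA h w (h * w + 1) b1 [(sy, sx, v0)]) h w
  have hglen : (pvGravityA (pvBfsA h w (h * w + 1) b1 [(sy, sx, v0)]) h w).length = h := by
    have := pvShape_length g1
    simpa using this
  apply List.ext_getElem
  · simp [hglen]
  · intro r h1 h2
    have hrh : r < h := by rw [hglen] at h1; exact h1
    have hrowlen : (pvGravityA (pvBfsA h w (h * w + 1) b1 [(sy, sx, v0)]) h w)[r].length = w := by
      rw [← pvGetD_eq_getElem' _ r h1, pvShape_rowlen g1 r,
        pvGetD_eq_getElem' _ r (by simpa using hrh)]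
      simp
    apply List.ext_getElem
    · simp only [List.getElem_map, List.getElem_range, List.length_map, List.length_range]
      exact hrowlen
    · intro c hc1 hc2
      have hcw : c < w := by rw [hrowlen] at hc1; exact hc1
      rw [pvGetElem_read _ r c h1 hc1]
      simp only [List.getElem_map, List.getElem_range]
      rw [g2 r c hrh hcw,
        pvEntry_eq (pvBfsA h w (h * w + 1) b1 [(sy, sx, v0)])
          (pvExplode h w (h * w + 1) b1 sy sx v0) h w F r c hrh hcw,
        ← pvReadColsB (pvExplode h w (h * w + 1) b1 sy sx v0) h w r c hrh hcw]
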